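-- pv_equiv track=rewrite | github.com/telemoquina0/IFv2 | pages/funcionalidades/myfunc.py | dame_tallas
-- ===== SOURCE A (Python) =====
-- def dame_tallas(especie):
--
--     if especie == "TURBOT":
--         cortes_vec = [0, 300, 400, 600, 800, 1000, 1500, 2000, 2500, 3000, 4000, 5000]
--     elif especie == "SOLE":
--         cortes_vec = [0, 100, 200, 300, 400, 500, 600, 800, 1000]
--     else:
--         return []
--     long=len(cortes_vec)
--     talla = [f"{i} - {j}" for i,j in zip(cortes_vec[0:long-1], cortes_vec[1:])]
--
--     if especie == "TURBOT":
--         talla[long-2]= talla[long-2].replace(" - 5000", "")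
--     if especie == "SOLE":
--         talla[long-2]= talla[long-2].replace(" - 1000", " - 10000")
--     return talla
-- ===== SOURCE B (Python) =====
-- _TALLAS = {
--     "TURBOT": ["0 - 300", "300 - 400", "400 - 600", "600 - 800", "800 - 1000",
--                "1000 - 1500", "1500 - 2000", "2000 - 2500", "2500 - 3000",
--                "3000 - 4000", "4000"],
--     "SOLE": ["0 - 100", "100 - 200", "200 - 300", "300 - 400", "400 - 500",
--              "500 - 600", "600 - 800", "800 - 10000"],
-- }
--
--
-- def dame_tallas(especie):
--     return list(_TALLAS.get(especie, []))
-- ===== Notes on version B (the rewrite author's own statement) =====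
-- stated objective: idiomatic
-- what changed: B replaces A's pairwise zip/format construction and post-hoc string replace with a precomputed constant lookup table keyed by species (dict.get with [] default), doing no string computation at call time.
import Mathlib
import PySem

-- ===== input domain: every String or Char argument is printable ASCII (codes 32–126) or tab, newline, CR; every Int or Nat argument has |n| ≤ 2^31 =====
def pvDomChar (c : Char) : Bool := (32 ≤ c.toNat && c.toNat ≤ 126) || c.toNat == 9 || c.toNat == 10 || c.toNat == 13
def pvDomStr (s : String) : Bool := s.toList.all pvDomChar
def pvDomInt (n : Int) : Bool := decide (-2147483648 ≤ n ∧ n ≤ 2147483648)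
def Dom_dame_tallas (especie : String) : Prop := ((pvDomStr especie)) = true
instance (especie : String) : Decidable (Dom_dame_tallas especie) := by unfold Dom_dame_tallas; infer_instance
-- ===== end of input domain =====

-- B replaces A's zip/format construction + post-hoc replace with a precomputed
-- constant lookup table keyed by species (objective: idiomatic).

-- ===== PORT A =====
def dame_tallas (especie : String) : List String :=
  let cortes? : Option (List Int) :=
    if especie == "TURBOT" then
      some [0, 300, 400, 600, 800, 1000, 1500, 2000, 2500, 3000, 4000, 5000]
    else if especie == "SOLE" then
      some [0, 100, 200, 300, 400, 500, 600, 800, 1000]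
    else none
  match cortes? with
  | none => []
  | some cortes_vec =>
    let long := cortes_vec.length
    let talla :=
      (List.zip (PySem.List.slice cortes_vec (some 0) (some ((long : Int) - 1)))
                (PySem.List.slice cortes_vec (some 1) none)).map
        (fun p => PySem.Int.toStr p.1 ++ " - " ++ PySem.Int.toStr p.2)
    let talla :=
      if especie == "TURBOT" then
        talla.set (long - 2) (PySem.Str.replace (talla.getD (long - 2) "") " - 5000" "")
      else talla
    let talla :=
      if especie == "SOLE" then
        talla.set (long - 2) (PySem.Str.replace (talla.getD (long - 2) "") " - 1000" " - 10000")
      else talla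
    talla

-- ===== PORT B =====
-- B's constant lookup table (Python dict -> association list, lookup = first match)
def tallasTable : PySem.Dict String (List String) :=
  PySem.Dict.mk [("TURBOT", ["0 - 300", "300 - 400", "400 - 600", "600 - 800", "800 - 1000",
               "1000 - 1500", "1500 - 2000", "2000 - 2500", "2500 - 3000",
               "3000 - 4000", "4000"]),
   ("SOLE", ["0 - 100", "100 - 200", "200 - 300", "300 - 400", "400 - 500",
             "500 - 600", "600 - 800", "800 - 10000"])]

def dame_tallas_alt (especie : String) : List String :=
  PySem.Dict.getD tallasTable especie []

-- ===== PRECONDITION & SPEC =====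
def Spec_dame_tallas (especie : String) (out : List String) : Prop := out = dame_tallas_alt especie
instance (especie : String) (out : List String) : Decidable (Spec_dame_tallas especie out) := by unfold Spec_dame_tallas; infer_instance

-- ===== CLAIM =====
def Claim_equal_dame_tallas : Prop := ∀ (especie : String), Dom_dame_tallas especie → Spec_dame_tallas especie (dame_tallas especie)

-- ===== LEMMAS AND PROOFS =====

-- ===== VERDICT =====
theorem dame_tallas_spec : Claim_equal_dame_tallas := by
  intro especie _
  unfold Spec_dame_tallas
  by_cases hT : especie = "TURBOT"
  · subst hT; rfl
  · by_cases hS : especie = "SOLE"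
    · subst hS; rfl
    · have h1 : ("TURBOT" == especie) = false := by simpa using Ne.symm hT
      have h2 : ("SOLE" == especie) = false := by simpa using Ne.symm hS
      simp [dame_tallas, dame_tallas_alt, tallasTable, PySem.Dict.getD, PySem.Dict.get?,
            PySem.Dict.items, List.find?, h1, h2, hT, hS]
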